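-- pv_equiv track=rewrite | github.com/pedroceciliocn/programa-o-1 | monitoria/prova 2/q1.py | MultiplicaDigitos
-- ===== SOURCE A (Python) =====
-- def MultiplicaDigitos(Num):
--     if Num < 1:
--         return -1
--     elif Num > 999999:
--         return -2
--     else:
--         mult = 1
--         while Num > 0:
--             if Num % 10 != 0:
--                 mult = mult * (Num % 10)
--             Num = Num // 10
--
--     return mult
-- ===== SOURCE B (Python) =====
-- def MultiplicaDigitos(Num):
--     if Num < 1:
--         return -1
--     if Num > 999999:
--         return -2
--     mult = 1
--     for c in str(Num):
--         if c != '0':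
--             mult = mult * int(c)
--     return mult
-- ===== Notes on version B (the rewrite author's own statement) =====
-- stated objective: idiomatic
-- what changed: B replaces the arithmetic digit-extraction loop (modulo and floor-division by ten) with a traversal of the decimal string representation str(Num), multiplying the nonzero digit characters; the two range guards are unchanged.
import Mathlib
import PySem

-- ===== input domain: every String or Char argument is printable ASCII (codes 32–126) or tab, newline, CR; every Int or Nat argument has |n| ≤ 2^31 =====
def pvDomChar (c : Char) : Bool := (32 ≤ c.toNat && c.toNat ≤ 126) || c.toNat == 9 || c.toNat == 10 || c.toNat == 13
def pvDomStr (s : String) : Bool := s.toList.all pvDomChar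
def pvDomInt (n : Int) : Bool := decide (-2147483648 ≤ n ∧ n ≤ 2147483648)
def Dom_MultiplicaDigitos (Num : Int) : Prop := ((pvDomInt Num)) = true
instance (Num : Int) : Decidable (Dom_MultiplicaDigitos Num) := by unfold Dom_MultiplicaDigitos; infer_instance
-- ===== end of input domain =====

-- B multiplies the nonzero digit characters of str(Num) instead of A's arithmetic digit-extraction loop (idiomatic rewrite, same cost).

-- ===== PORT A =====
-- A's while loop: Num > 0 → multiply in Num % 10 when nonzero, then Num //= 10.
def pvLoopA (mult : Int) (Num : Int) : Int :=
  if _h : Num > 0 then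
    pvLoopA (if PySem.Int.mod Num 10 ≠ 0 then mult * PySem.Int.mod Num 10 else mult)
            (PySem.Int.floordiv Num 10)
  else mult
termination_by Num.toNat
decreasing_by
  rw [PySem.Int.floordiv_eq_ediv_of_pos (by omega : (0:Int) < 10)]
  omega

def MultiplicaDigitos (Num : Int) : Int :=
  if Num < 1 then -1
  else if Num > 999999 then -2
  else pvLoopA 1 Num

-- ===== PORT B =====
-- loop body of Source B: "if c != '0': mult = mult * int(c)"; int(c) is ported as
-- c.toNat - 48, which is exact for the decimal digit characters str(Num) yields here.
def pvStep (mult : Int) (c : Char) : Int :=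
  if c ≠ '0' then mult * ((c.toNat : Int) - 48) else mult

def MultiplicaDigitos_alt (Num : Int) : Int :=
  if Num < 1 then -1
  else if Num > 999999 then -2
  else (PySem.Int.toStr Num).toList.foldl pvStep 1

-- ===== PRECONDITION & SPEC =====
def Spec_MultiplicaDigitos (Num : Int) (out : Int) : Prop := out = MultiplicaDigitos_alt Num
instance (Num : Int) (out : Int) : Decidable (Spec_MultiplicaDigitos Num out) := by unfold Spec_MultiplicaDigitos; infer_instance

-- ===== CLAIM (what is proved, stated in full; the proofs are below) =====
def Claim_equal_MultiplicaDigitos : Prop := ∀ (Num : Int), Dom_MultiplicaDigitos Num → Spec_MultiplicaDigitos Num (MultiplicaDigitos Num)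

-- ===== LEMMAS AND PROOFS =====

-- most-significant-digit-first decimal digit characters of m (the shape of Nat.toDigits 10)
def pvDigitsMSB (m : Nat) : List Char :=
  if m < 10 then [Nat.digitChar m]
  else pvDigitsMSB (m / 10) ++ [Nat.digitChar (m % 10)]
termination_by m
decreasing_by omega

lemma pvToDigitsCore_eq (f : Nat) : ∀ (n : Nat) (acc : List Char), n < f →
    Nat.toDigitsCore 10 f n acc = pvDigitsMSB n ++ acc := by
  induction f with
  | zero => intro n acc h; omega
  | succ f ih =>
    intro n acc h
    rw [Nat.toDigitsCore]
    by_cases h0 : n / 10 = 0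
    · have hn : n < 10 := by omega
      rw [pvDigitsMSB]
      simp [h0, hn, Nat.mod_eq_of_lt hn]
    · have hge : 10 ≤ n := by omega
      have hlt : n / 10 < f := by omega
      have hrec : pvDigitsMSB n = pvDigitsMSB (n / 10) ++ [Nat.digitChar (n % 10)] := by
        conv_lhs => rw [pvDigitsMSB]
        rw [if_neg (by omega)]
      rw [if_neg h0, ih _ _ hlt, hrec]
      simp

lemma pvToDigits_eq (n : Nat) : Nat.toDigits 10 n = pvDigitsMSB n := by
  have := pvToDigitsCore_eq (n + 1) n [] (by omega)
  simpa [Nat.toDigits] using this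

lemma pvDigitChar_toNat {m : Nat} (h : m < 10) : (Nat.digitChar m).toNat = 48 + m := by
  interval_cases m <;> decide

lemma pvDigitChar_eq_zero_iff {m : Nat} (h : m < 10) : Nat.digitChar m = '0' ↔ m = 0 := by
  interval_cases m <;> decide

lemma pvLoopA_mul (k : Nat) : ∀ (n : Int) (a : Int), n.toNat ≤ k →
    pvLoopA a n = a * pvLoopA 1 n := by
  induction k with
  | zero =>
    intro n a h
    rw [pvLoopA.eq_def, pvLoopA.eq_def (mult := 1)]
    have : ¬ n > 0 := by omega
    simp [this]
  | succ k ih =>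
    intro n a h
    by_cases hp : n > 0
    · rw [pvLoopA.eq_def, pvLoopA.eq_def (mult := 1)]
      simp only [hp, dif_pos]
      have hf : PySem.Int.floordiv n 10 = n / 10 :=
        PySem.Int.floordiv_eq_ediv_of_pos (by omega)
      have hm : PySem.Int.mod n 10 = n % 10 :=
        PySem.Int.mod_eq_emod_of_pos (by omega)
      have hle : (n / 10).toNat ≤ k := by omega
      rw [hf, hm]
      by_cases hz : n % 10 = 0
      · simp only [hz, ne_eq, not_true_eq_false, if_false]
        exact ih _ _ hle
      · simp only [hz, ne_eq, not_false_iff, if_true, one_mul]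
        rw [ih _ (a * (n % 10)) hle, ih _ (n % 10) hle]
        ring
    · rw [pvLoopA.eq_def, pvLoopA.eq_def (mult := 1)]
      simp [hp]

lemma pvMain (m : Nat) (hm : 0 < m) :
    (pvDigitsMSB m).foldl pvStep 1 = pvLoopA 1 (m : Int) := by
  induction m using Nat.strong_induction_on with
  | _ m ih =>
    rw [pvDigitsMSB]
    by_cases hlt : m < 10
    · simp only [hlt, if_pos, List.foldl_cons, List.foldl_nil]
      have hne : Nat.digitChar m ≠ '0' := by
        intro hc; exact absurd ((pvDigitChar_eq_zero_iff hlt).mp hc) (by omega)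
      rw [pvLoopA.eq_def]
      have hp : (m : Int) > 0 := by omega
      simp only [hp, dif_pos]
      have hm10 : PySem.Int.mod (m : Int) 10 = (m : Int) := by
        rw [PySem.Int.mod_eq_emod_of_pos (by omega)]; omega
      have hf0 : PySem.Int.floordiv (m : Int) 10 = 0 := by
        rw [PySem.Int.floordiv_eq_ediv_of_pos (by omega)]; omega
      rw [hm10, hf0, pvLoopA.eq_def]
      simp only [show ¬ (0:Int) > 0 by omega, dif_neg, not_false_iff]
      have hne0 : ¬ (m : Int) = 0 := by omega
      simp only [pvStep, hne, ne_eq, not_false_iff, if_true, one_mul,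
        pvDigitChar_toNat hlt, hne0]
      omega
    · simp only [hlt, if_neg, not_false_iff]
      rw [List.foldl_append]
      have hq : 0 < m / 10 := by omega
      have hql : m / 10 < m := by omega
      simp only [List.foldl_cons, List.foldl_nil]
      rw [ih (m / 10) hql hq]
      -- right-hand side: one step of A's loop
      conv_rhs => rw [pvLoopA.eq_def]
      have hp : (m : Int) > 0 := by omega
      simp only [hp, dif_pos]
      have hm10 : PySem.Int.mod (m : Int) 10 = ((m % 10 : Nat) : Int) := by
        rw [PySem.Int.mod_eq_emod_of_pos (by omega)]; omega
      have hf10 : PySem.Int.floordiv (m : Int) 10 = ((m / 10 : Nat) : Int) := by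
        rw [PySem.Int.floordiv_eq_ediv_of_pos (by omega)]; omega
      rw [hm10, hf10]
      have hd : m % 10 < 10 := by omega
      by_cases hz : m % 10 = 0
      · have hc0 : Nat.digitChar (m % 10) = '0' := (pvDigitChar_eq_zero_iff hd).mpr hz
        have hzi : ((m % 10 : Nat) : Int) = 0 := by omega
        simp [pvStep, hc0, hzi]
      · have hne : Nat.digitChar (m % 10) ≠ '0' := by
          intro hc; exact hz ((pvDigitChar_eq_zero_iff hd).mp hc)
        have hzi : ((m % 10 : Nat) : Int) ≠ 0 := by omega
        simp only [pvStep, hne, ne_eq, not_false_iff, if_true, hzi,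
          pvDigitChar_toNat hd]
        rw [pvLoopA_mul (m / 10) ((m / 10 : Nat) : Int) (1 * ((m % 10 : Nat) : Int)) (by omega)]
        push_cast
        ring

-- ===== VERDICT (by name: the statement is the Claim_ definition above) =====
theorem MultiplicaDigitos_spec : Claim_equal_MultiplicaDigitos := by
  intro Num _
  unfold Spec_MultiplicaDigitos MultiplicaDigitos MultiplicaDigitos_alt
  by_cases h1 : Num < 1
  · simp [h1]
  · by_cases h2 : Num > 999999
    · simp [h1, h2]
    · simp only [h1, h2, if_neg, not_false_iff]
      have hpos : 0 < Num := by omega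
      have hmn : Num = ((Num.toNat : Nat) : Int) := by omega
      rw [PySem.Int.toList_toStr]
      simp only [PySem.Int.toChars, show ¬ Num < 0 by omega, if_neg, not_false_iff]
      rw [pvToDigits_eq, pvMain Num.toNat (by omega)]
      rw [← hmn]
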